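-- pv_equiv track=rewrite | github.com/ethanewer/encoder-addition | rasp/count_triplets.py | count_triplets_linear
-- ===== SOURCE A (Python) =====
-- def count_triplets_linear(x):
--     n = len(x)
--     count = 0
--     mod_counts = [0] * n
--     for i in range(n):
--         mod_counts[(n - x[i]) % n] += 1
--
--     for i in range(n):
--         count += mod_counts[(x[i] + x[-1]) % n]
--
--     return [count % n] * n
-- ===== SOURCE B (Python) =====
-- def count_triplets_linear(x):
--     n = len(x)
--     count = 0
--     for i in range(n):
--         for j in range(n):
--             if (x[i] + x[j] + x[-1]) % n == 0:
--                 count += 1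
--     return [count % n] * n
-- ===== Notes on version B (the rewrite author's own statement) =====
-- stated objective: simpler
-- what changed: Replaced the precomputed mod_counts histogram table with a direct nested scan counting pairs (i,j) with (x[i]+x[j]+x[-1]) % n == 0, removing the auxiliary array entirely.
-- outside the precondition, e.g. on count_triplets_linear([]): A raises ZeroDivisionError, B raises ZeroDivisionError
import Mathlib
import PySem

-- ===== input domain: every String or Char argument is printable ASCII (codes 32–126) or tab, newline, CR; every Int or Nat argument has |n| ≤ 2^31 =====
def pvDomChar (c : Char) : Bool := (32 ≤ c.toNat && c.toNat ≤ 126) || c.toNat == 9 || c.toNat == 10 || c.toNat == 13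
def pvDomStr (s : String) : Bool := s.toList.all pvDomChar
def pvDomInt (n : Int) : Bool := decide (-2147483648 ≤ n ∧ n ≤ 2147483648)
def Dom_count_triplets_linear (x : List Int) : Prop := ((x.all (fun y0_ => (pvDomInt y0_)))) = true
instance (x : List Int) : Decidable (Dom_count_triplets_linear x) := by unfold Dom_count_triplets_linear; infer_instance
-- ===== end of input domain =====

-- B replaces A's mod_counts histogram by a direct nested pair scan; objective: simpler (no auxiliary table).

-- ===== PORT A =====
def count_triplets_linear (x : List Int) : List Int :=
  let n : Int := (x.length : Int)
  let count : Int := 0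
  let mod_counts : List Int := List.replicate x.length 0
  let mod_counts := (PySem.List.pyRange 0 n 1).foldl
    (fun mc i =>
      let r := PySem.Int.mod (n - PySem.List.pyGetD x i 0) n
      PySem.List.pySetD mc r (PySem.List.pyGetD mc r 0 + 1)) mod_counts
  let count := (PySem.List.pyRange 0 n 1).foldl
    (fun c i =>
      c + PySem.List.pyGetD mod_counts
            (PySem.Int.mod (PySem.List.pyGetD x i 0 + PySem.List.pyGetD x (-1) 0) n) 0) count
  List.replicate x.length (PySem.Int.mod count n)

-- ===== PORT B =====
def count_triplets_linear_alt (x : List Int) : List Int :=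
  let n : Int := (x.length : Int)
  let count := (PySem.List.pyRange 0 n 1).foldl
    (fun c i => (PySem.List.pyRange 0 n 1).foldl
      (fun c j =>
        if PySem.Int.mod (PySem.List.pyGetD x i 0 + PySem.List.pyGetD x j 0
                          + PySem.List.pyGetD x (-1) 0) (x.length : Int) = 0
        then c + 1 else c) c) 0
  List.replicate x.length (PySem.Int.mod count n)

-- ===== PRECONDITION & SPEC =====
-- On x = [] both A and B raise ZeroDivisionError (count % 0); Pre_ excludes exactly that input.
def Pre_count_triplets_linear (x : List Int) : Prop := x ≠ []
instance (x : List Int) : Decidable (Pre_count_triplets_linear x) := by unfold Pre_count_triplets_linear; infer_instance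
def pvWitness_count_triplets_linear : List Int := [1, 2, 3]

def Spec_count_triplets_linear (x : List Int) (out : List Int) : Prop := out = count_triplets_linear_alt x
instance (x : List Int) (out : List Int) : Decidable (Spec_count_triplets_linear x out) := by unfold Spec_count_triplets_linear; infer_instance

-- ===== CLAIM (what is proved, stated in full; the proofs are below) =====
def Claim_equal_count_triplets_linear : Prop := ∀ (x : List Int), Dom_count_triplets_linear x → Pre_count_triplets_linear x → Spec_count_triplets_linear x (count_triplets_linear x)

-- ===== LEMMAS AND PROOFS =====

lemma pyGetD_nonneg_toNat (xs : List Int) (i : Int) (d : Int) (h : 0 ≤ i) :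
    PySem.List.pyGetD xs i d = xs.getD i.toNat d := by
  have e : i = ((i.toNat : Nat) : Int) := (Int.toNat_of_nonneg h).symm
  rw [e, PySem.List.pyGetD_natCast, Int.toNat_natCast]

lemma getD_set_eq (mc : List Int) (k t : Nat) (v : Int) (hk : k < mc.length) :
    (mc.set k v).getD t 0 = if t = k then v else mc.getD t 0 := by
  by_cases h : t = k
  · subst h; simp [List.getD_eq_getElem?_getD, hk]
  · simp [List.getD_eq_getElem?_getD, List.getElem?_set_ne (fun hh => h hh.symm), h]

lemma hist (r : Nat → Nat) (L : List Nat) : ∀ (mc : List Int) (t : Nat),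
    (∀ i ∈ L, r i < mc.length) →
    ((L.foldl (fun mc i => mc.set (r i) (mc.getD (r i) 0 + 1)) mc).getD t 0)
      = mc.getD t 0 + ((L.countP (fun i => r i = t) : Nat) : Int) := by
  induction L with
  | nil => intro mc t _; simp
  | cons a L ih =>
    intro mc t hb
    have ha : r a < mc.length := hb a (by simp)
    have hb' : ∀ i ∈ L, r i < (mc.set (r a) (mc.getD (r a) 0 + 1)).length := by
      intro i hi; simpa using hb i (List.mem_cons_of_mem _ hi)
    rw [List.foldl_cons, ih _ t hb', getD_set_eq _ _ _ _ ha, List.countP_cons]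
    by_cases h : t = r a
    · simp [h]; omega
    · have : ¬ (r a = t) := fun hh => h hh.symm
      simp [h, this]

lemma mod_pair (n a b c : Int) (hn : 0 < n) :
    (PySem.Int.mod (n - b) n = PySem.Int.mod (a + c) n) ↔ PySem.Int.mod (a + b + c) n = 0 := by
  simp only [PySem.Int.mod_eq_emod_of_pos hn]
  rw [Int.emod_eq_emod_iff_emod_sub_eq_zero]
  constructor
  · intro h
    have hd : n ∣ (n - b - (a + c)) := Int.dvd_of_emod_eq_zero h
    have hd2 : n ∣ (a + b + c) := by
      have e : n - (a + b + c) = n - b - (a + c) := by ring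
      exact (dvd_sub_right (dvd_refl n)).mp (e ▸ hd)
    exact Int.emod_eq_zero_of_dvd hd2
  · intro h
    have hd : n ∣ (a + b + c) := Int.dvd_of_emod_eq_zero h
    have hd2 : n ∣ (n - b - (a + c)) := by
      have e : n - b - (a + c) = n - (a + b + c) := by ring
      exact e ▸ (dvd_sub_right (dvd_refl n)).mpr hd
    exact Int.emod_eq_zero_of_dvd hd2

lemma counts_core (x : List Int) (hx : x ≠ []) :
    count_triplets_linear x = count_triplets_linear_alt x := by
  have hm : 0 < x.length := List.length_pos_iff.mpr hx
  have hn : (0:Int) < (x.length : Int) := by exact_mod_cast hm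
  unfold count_triplets_linear count_triplets_linear_alt
  simp only [PySem.List.pyRange_one, sub_zero, Int.toNat_natCast, List.foldl_map, zero_add,
    PySem.List.pyGetD_natCast]
  congr 1
  -- histogram loop in Nat form
  have hstep : (fun (mc : List Int) (y : Nat) =>
        PySem.List.pySetD mc (PySem.Int.mod ((x.length:Int) - x.getD y 0) (x.length:Int))
          (PySem.List.pyGetD mc (PySem.Int.mod ((x.length:Int) - x.getD y 0) (x.length:Int)) 0 + 1))
      = (fun mc y => mc.set (PySem.Int.mod ((x.length:Int) - x.getD y 0) (x.length:Int)).toNat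
          (mc.getD (PySem.Int.mod ((x.length:Int) - x.getD y 0) (x.length:Int)).toNat 0 + 1)) := by
    funext mc y
    rw [PySem.List.pySetD_of_nonneg _ _ (PySem.Int.mod_nonneg _ hn),
        pyGetD_nonneg_toNat _ _ _ (PySem.Int.mod_nonneg _ hn)]
  rw [hstep]
  set F : Nat → Nat := fun y => (PySem.Int.mod ((x.length:Int) - x.getD y 0) (x.length:Int)).toNat with hF
  set G : Nat → Nat := fun y => (PySem.Int.mod (x.getD y 0 + PySem.List.pyGetD x (-1) 0) (x.length:Int)).toNat with hG
  set MC : List Int := List.foldl (fun mc y => mc.set (F y) (mc.getD (F y) 0 + 1))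
      (List.replicate x.length 0) (List.range x.length) with hMC
  -- outer reads in Nat form
  have hread : (fun (c : Int) (y : Nat) =>
        c + PySem.List.pyGetD MC (PySem.Int.mod (x.getD y 0 + PySem.List.pyGetD x (-1) 0) (x.length:Int)) 0)
      = (fun c y => c + MC.getD (G y) 0) := by
    funext c y
    rw [pyGetD_nonneg_toNat _ _ _ (PySem.Int.mod_nonneg _ hn)]
  rw [hread, PySem.List.foldl_add, zero_add]
  -- B side: inner loop is a countP
  have hinner : (fun (c : Int) (y : Nat) =>
        List.foldl (fun c2 j => if PySem.Int.mod (x.getD y 0 + x.getD j 0 + PySem.List.pyGetD x (-1) 0) (x.length:Int) = 0 then c2 + 1 else c2) c (List.range x.length))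
      = (fun (c : Int) (y : Nat) => c + (((List.range x.length).countP (fun j => decide (PySem.Int.mod (x.getD y 0 + x.getD j 0 + PySem.List.pyGetD x (-1) 0) (x.length:Int) = 0)) : Nat) : Int)) := by
    funext c y
    rw [PySem.List.foldl_ite_add_one]
  rw [hinner, PySem.List.foldl_add, zero_add]
  have hrow : ∀ y ∈ List.range x.length,
      MC.getD (G y) 0 = (((List.range x.length).countP (fun j => decide (PySem.Int.mod (x.getD y 0 + x.getD j 0 + PySem.List.pyGetD x (-1) 0) (x.length:Int) = 0)) : Nat) : Int) := by
    intro y hy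
    -- per-row equality
    have hbound : ∀ j ∈ List.range x.length, F j < (List.replicate x.length (0:Int)).length := by
      intro j _
      simp only [List.length_replicate, hF]
      have h1 := PySem.Int.mod_lt ((x.length:Int) - x.getD j 0) hn
      have h2 := PySem.Int.mod_nonneg ((x.length:Int) - x.getD j 0) hn
      omega
    rw [hMC, hist F (List.range x.length) _ (G y) hbound,
        List.getD_replicate _ (by
          have h1 := PySem.Int.mod_lt (x.getD y 0 + PySem.List.pyGetD x (-1) 0) hn
          have h2 := PySem.Int.mod_nonneg (x.getD y 0 + PySem.List.pyGetD x (-1) 0) hn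
          simp only [hG]; omega), zero_add]
    congr 1
    apply List.countP_congr
    intro j hj
    simp only [hF, hG, decide_eq_true_eq]
    have hinj : (PySem.Int.mod ((x.length:Int) - x.getD j 0) (x.length:Int)).toNat
          = (PySem.Int.mod (x.getD y 0 + PySem.List.pyGetD x (-1) 0) (x.length:Int)).toNat
        ↔ PySem.Int.mod ((x.length:Int) - x.getD j 0) (x.length:Int)
          = PySem.Int.mod (x.getD y 0 + PySem.List.pyGetD x (-1) 0) (x.length:Int) := by
      have h1 := PySem.Int.mod_nonneg ((x.length:Int) - x.getD j 0) hn
      have h2 := PySem.Int.mod_nonneg (x.getD y 0 + PySem.List.pyGetD x (-1) 0) hn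
      omega
    rw [hinj]
    exact mod_pair (x.length:Int) (x.getD y 0) (x.getD j 0) (PySem.List.pyGetD x (-1) 0) hn
  rw [List.map_congr_left hrow]

-- ===== VERDICT (by name: the statement is the Claim_ definition above) =====
theorem count_triplets_linear_spec : Claim_equal_count_triplets_linear := by
  intro x _ hx
  unfold Spec_count_triplets_linear
  exact counts_core x hx
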